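-- pv_equiv track=rewrite | github.com/MuditaLi/demanding-forecasting | util/misc.py | add_period
-- ===== SOURCE A (Python) =====
-- def add_period(date, add, highest_period: int=52):
--     """
--     This function returns a week (or month) equal to date + add
--     Inputs:
--         - date: integer indicating a week number or month number
--         - add: integer indicating the number of weeks to add
--         - is_weekly_mode: boolean that indicates if the date is in week or months
--     Returns:
--         - res: the resulting operation (a new date, integer)
--     """
--     i = 0
--     while i < add:
--         if date % 100 != highest_period:
--             date += 1
--         else:
--             date = ((date//100)+1)*100+1
--         i += 1
--     return date
-- ===== SOURCE B (Python) =====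
-- def add_period(date, add, highest_period: int = 52):
--     # Closed-form jump instead of iterating `add` times.
--     if add <= 0:
--         return date
--     if highest_period < 0 or highest_period >= 100:
--         # the period digits (date % 100) can never equal highest_period
--         return date + add
--     r0 = date % 100
--     delta = (highest_period - r0) % 100  # steps until the period hits highest_period
--     if add <= delta:
--         return date + add
--     rem = add - delta - 1                 # steps left after the first rollover
--     base = (date + delta) // 100          # year at the first rollover
--     cyc_len = highest_period if highest_period >= 1 else 100
--     cyc_add = 100 if highest_period >= 1 else 200
--     cycles, rem2 = divmod(rem, cyc_len)
--     return (base + 1) * 100 + 1 + cycles * cyc_add + rem2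
-- ===== Notes on version B (the rewrite author's own statement) =====
-- stated objective: faster
-- what changed: Replaces the one-week-at-a-time while loop (add iterations) by a closed-form divmod computation: steps to the first rollover, then whole year-cycles and a remainder, handling the never-rolls-over (highest_period outside 0..99) and highest_period==0 regimes arithmetically.
import Mathlib
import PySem

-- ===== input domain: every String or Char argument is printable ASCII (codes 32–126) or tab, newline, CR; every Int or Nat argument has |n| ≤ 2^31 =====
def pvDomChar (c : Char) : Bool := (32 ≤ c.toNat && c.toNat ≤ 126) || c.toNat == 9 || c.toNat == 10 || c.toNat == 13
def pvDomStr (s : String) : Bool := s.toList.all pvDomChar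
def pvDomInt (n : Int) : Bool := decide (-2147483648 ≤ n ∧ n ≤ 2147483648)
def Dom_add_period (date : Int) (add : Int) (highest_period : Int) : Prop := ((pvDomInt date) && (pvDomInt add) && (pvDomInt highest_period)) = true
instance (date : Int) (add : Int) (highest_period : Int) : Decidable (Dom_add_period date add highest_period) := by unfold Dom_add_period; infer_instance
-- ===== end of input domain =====

-- B replaces A's step-by-step while loop over `add` iterations by a closed-form
-- divmod jump (objective: faster, O(1) instead of O(add)).

-- ===== PORT A =====
-- the Python while loop: i = 0; while i < add: …; i += 1
def add_period_loop (add : Int) (highest_period : Int) (date : Int) (i : Int) : Int :=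
  if _h : i < add then
    add_period_loop add highest_period
      (if PySem.Int.mod date 100 ≠ highest_period then date + 1
       else (PySem.Int.floordiv date 100 + 1) * 100 + 1)
      (i + 1)
  else date
termination_by (add - i).toNat
decreasing_by omega

def add_period (date : Int) (add : Int) (highest_period : Int) : Int :=
  add_period_loop add highest_period date 0

-- ===== PORT B =====
def add_period_alt (date : Int) (add : Int) (highest_period : Int) : Int :=
  if add ≤ 0 then date
  else if highest_period < 0 ∨ 100 ≤ highest_period then date + add
  else
    let r0 := PySem.Int.mod date 100
    let delta := PySem.Int.mod (highest_period - r0) 100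
    if add ≤ delta then date + add
    else
      let rem := add - delta - 1
      let base := PySem.Int.floordiv (date + delta) 100
      let cycLen := if 1 ≤ highest_period then highest_period else 100
      let cycAdd := if 1 ≤ highest_period then (100 : Int) else 200
      let cycles := PySem.Int.floordiv rem cycLen
      let rem2 := PySem.Int.mod rem cycLen
      (base + 1) * 100 + 1 + cycles * cycAdd + rem2

-- ===== PRECONDITION & SPEC =====
def Spec_add_period (date : Int) (add : Int) (highest_period : Int) (out : Int) : Prop := out = add_period_alt date add highest_period
instance (date : Int) (add : Int) (highest_period : Int) (out : Int) : Decidable (Spec_add_period date add highest_period out) := by unfold Spec_add_period; infer_instance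

-- ===== CLAIM (what is proved, stated in full; the proofs are below) =====
def Claim_equal_add_period : Prop := ∀ (date : Int) (add : Int) (highest_period : Int), Dom_add_period date add highest_period → Spec_add_period date add highest_period (add_period date add highest_period)

-- ===== LEMMAS AND PROOFS =====

-- B's closed form written with Int.ediv / Int.emod (equal to the PySem ops since
-- every divisor reached is positive)
def altE (date : Int) (add : Int) (h : Int) : Int :=
  if add ≤ 0 then date
  else if h < 0 ∨ 100 ≤ h then date + add
  else
    let delta := (h - date % 100) % 100
    if add ≤ delta then date + add
    else
      let rem := add - delta - 1
      let base := (date + delta) / 100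
      let cycLen := if 1 ≤ h then h else 100
      let cycAdd := if 1 ≤ h then (100 : Int) else 200
      (base + 1) * 100 + 1 + (rem / cycLen) * cycAdd + rem % cycLen

lemma pv_mod100 (a : Int) : PySem.Int.mod a 100 = a % 100 :=
  PySem.Int.mod_eq_emod_of_pos (by norm_num)

lemma pv_div100 (a : Int) : PySem.Int.floordiv a 100 = a / 100 :=
  PySem.Int.floordiv_eq_ediv_of_pos (by norm_num)

lemma alt_eq_altE (date add h : Int) : add_period_alt date add h = altE date add h := by
  unfold add_period_alt altE
  by_cases h1 : add ≤ 0
  · simp [h1]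
  by_cases h2 : h < 0 ∨ 100 ≤ h
  · simp [h1, h2]
  simp only [if_neg h1, if_neg h2, pv_mod100, pv_div100]
  by_cases hh : 1 ≤ h
  · simp only [if_pos hh,
      PySem.Int.mod_eq_emod_of_pos (b := h) (by omega),
      PySem.Int.floordiv_eq_ediv_of_pos (b := h) (by omega)]
  · simp only [if_neg hh, pv_mod100, pv_div100]

-- altE satisfies the same one-step recurrence as A's loop body
lemma altE_step (date add h : Int) (ha : 1 ≤ add) :
    altE date add h =
      altE (if date % 100 ≠ h then date + 1 else (date / 100 + 1) * 100 + 1) (add - 1) h := by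
  by_cases hB : date % 100 = h
  · -- rollover step
    rw [if_neg (by simpa using hB)]
    unfold altE
    have hh0 : 0 ≤ h := hB ▸ Int.emod_nonneg date (by norm_num)
    have hh99 : h < 100 := hB ▸ Int.emod_lt_of_pos date (by norm_num)
    rw [if_neg (by omega : ¬ add ≤ 0), if_neg (by omega : ¬ (h < 0 ∨ 100 ≤ h)),
        if_neg (by omega : ¬ (h < 0 ∨ 100 ≤ h))]
    have hdelta : (h - date % 100) % 100 = 0 := by rw [hB]; simp
    rw [hdelta]
    have hx : ((date / 100 + 1) * 100 + 1) % 100 = 1 := by omega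
    by_cases hh1 : 1 ≤ h
    · have hd' : (h - ((date / 100 + 1) * 100 + 1) % 100) % 100 = h - 1 := by
        rw [hx]; omega
      rw [hd']
      simp only [if_pos hh1]
      by_cases hsmall : add - 1 ≤ h - 1
      · have eq1 : (add - 0 - 1) / h = 0 := Int.ediv_eq_zero_of_lt (by omega) (by omega)
        have eq2 : (add - 0 - 1) % h = add - 0 - 1 := Int.emod_eq_of_lt (by omega) (by omega)
        rw [eq1, eq2]
        split_ifs <;> omega
      · have e2 : ((date / 100 + 1) * 100 + 1 + (h - 1)) / 100 = date / 100 + 1 := by omega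
        have e3 : (add - 1 - (h - 1) - 1) / h = (add - 0 - 1) / h - 1 := by
          rw [show add - 1 - (h - 1) - 1 = add - 0 - 1 + (-1) * h from by ring,
              Int.add_mul_ediv_right _ _ (by omega : h ≠ 0)]
          ring
        have e4 : (add - 1 - (h - 1) - 1) % h = (add - 0 - 1) % h := by
          rw [show add - 1 - (h - 1) - 1 = add - 0 - 1 - h from by ring]
          exact Int.sub_emod_right _ _
        rw [e2, e3, e4]
        split_ifs <;> omega
    · -- h = 0
      have hh : h = 0 := by omega
      subst hh
      have hd' : (0 - ((date / 100 + 1) * 100 + 1) % 100) % 100 = 99 := by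
        rw [hx]; omega
      rw [hd']
      simp only [if_neg hh1]
      split_ifs <;> omega
  · -- plain +1 step
    rw [if_pos (by simpa using hB)]
    unfold altE
    by_cases h2 : h < 0 ∨ 100 ≤ h
    · rw [if_neg (by omega : ¬ add ≤ 0), if_pos h2]
      split_ifs <;> omega
    · rw [if_neg (by omega : ¬ add ≤ 0), if_neg h2]
      have hdd : (h - (date + 1) % 100) % 100 = (h - date % 100) % 100 - 1 := by
        have hsucc : (date + 1) % 100 = if date % 100 = 99 then 0 else date % 100 + 1 := by
          omega
        rw [hsucc]; split_ifs with hc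
        · omega
        · omega
      rw [hdd]
      by_cases hsmall : add ≤ (h - date % 100) % 100
      · by_cases h1a : add - 1 ≤ 0
        · rw [if_pos hsmall, if_pos h1a]; omega
        · rw [if_pos hsmall, if_neg h1a,
              if_neg (by omega : ¬ (h < 0 ∨ 100 ≤ h)),
              if_pos (by omega : add - 1 ≤ (h - date % 100) % 100 - 1)]
          ring
      · rw [if_neg hsmall, if_neg (by omega : ¬ add - 1 ≤ 0),
            if_neg (by omega : ¬ (h < 0 ∨ 100 ≤ h)),
            if_neg (by omega : ¬ add - 1 ≤ (h - date % 100) % 100 - 1)]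
        have e1 : add - 1 - ((h - date % 100) % 100 - 1) - 1 = add - (h - date % 100) % 100 - 1 := by
          ring
        have e2 : date + 1 + ((h - date % 100) % 100 - 1) = date + (h - date % 100) % 100 := by
          ring
        rw [e1, e2]

lemma loop_eq_altE (add h : Int) : ∀ (i date : Int), add_period_loop add h date i = altE date (add - i) h := by
  suffices H : ∀ (n : Nat) (i date : Int), (add - i).toNat ≤ n →
      add_period_loop add h date i = altE date (add - i) h by
    intro i date; exact H _ i date le_rfl
  intro n
  induction n with
  | zero =>
    intro i date hle
    rw [add_period_loop, dif_neg (by omega : ¬ i < add)]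
    unfold altE
    rw [if_pos (by omega : add - i ≤ 0)]
  | succ n ih =>
    intro i date hle
    rw [add_period_loop]
    by_cases hi : i < add
    · rw [dif_pos hi, ih (i + 1) _ (by omega)]
      have := (altE_step date (add - i) h (by omega)).symm
      simp only [pv_mod100, pv_div100]
      rw [show add - (i + 1) = add - i - 1 from by ring]
      exact this
    · rw [dif_neg hi]
      unfold altE
      rw [if_pos (by omega : add - i ≤ 0)]

-- ===== VERDICT (by name: the statement is the Claim_ definition above) =====
theorem add_period_spec : Claim_equal_add_period := by
  intro date add h _
  show add_period date add h = add_period_alt date add h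
  rw [add_period, loop_eq_altE, alt_eq_altE]
  norm_num
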